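-- pv_equiv track=rewrite | github.com/wolandvp-beep/ai-math-1-4 | backend/expression_rendering.py | pretty_expression_with_map
-- ===== SOURCE A (Python) =====
-- from typing import List
--
-- def pretty_expression_with_map(source: str) -> tuple[str, dict[int, int]]:
--     pretty_parts: List[str] = []
--     op_map = {}
--     current_len = 0
--     for index, ch in enumerate(source):
--         if ch in '+-*/':
--             symbol = '×' if ch == '*' else ':' if ch == '/' else ch
--             token = f' {symbol} '
--             pretty_parts.append(token)
--             op_map[index] = current_len + 1
--             current_len += len(token)
--         else:
--             pretty_parts.append(ch)
--             current_len += 1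
--     return ''.join(pretty_parts), op_map
-- ===== SOURCE B (Python) =====
-- OPS = {'*': ' \u00d7 ', '/': ' : ', '+': ' + ', '-': ' - '}
--
-- def pretty_expression_with_map(source: str) -> tuple[str, dict[int, int]]:
--     tokens = [OPS.get(ch, ch) for ch in source]
--     starts = [0]
--     for t in tokens:
--         starts.append(starts[-1] + len(t))
--     op_map = {i: starts[i] + 1 for i, ch in enumerate(source) if ch in OPS}
--     return ''.join(tokens), op_map
-- ===== Notes on version B (the rewrite author's own statement) =====
-- stated objective: alternative
-- what changed: Replaces A's single stateful loop (accumulating parts, running offset and dict together) with three separate passes: a token list built by a dict-lookup comprehension, an explicit prefix-sum table of token lengths, and an operator-only dict comprehension indexing that table.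
import Mathlib
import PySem

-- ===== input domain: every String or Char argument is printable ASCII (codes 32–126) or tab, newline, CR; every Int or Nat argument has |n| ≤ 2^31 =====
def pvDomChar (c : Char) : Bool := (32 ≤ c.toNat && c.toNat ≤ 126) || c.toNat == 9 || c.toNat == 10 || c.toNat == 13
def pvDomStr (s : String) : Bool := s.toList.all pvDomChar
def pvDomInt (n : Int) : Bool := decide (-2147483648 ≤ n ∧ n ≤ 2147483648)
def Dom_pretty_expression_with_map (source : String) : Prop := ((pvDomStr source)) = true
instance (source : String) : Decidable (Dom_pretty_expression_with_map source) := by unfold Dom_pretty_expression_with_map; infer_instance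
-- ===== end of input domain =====

-- B rewrites A's single stateful loop as three passes (a token-list comprehension over an OPS dict, a prefix-sum table of token lengths, and an operator-only pass); same cost, same return value.
-- Strings are handled as their List Char code points (String.mk / String.toList), exact for ''.join and f-string concatenation.

-- ===== PORT A =====
-- the characters of the Python string literal '+-*/'
def pvOpsStr : List Char := ['+', '-', '*', '/']

-- loop body of A's for-loop; state = (pretty_parts, op_map, current_len)
def pvStepA (st : List (List Char) × PySem.Dict Int Int × Int) (p : Int × Char) :
    List (List Char) × PySem.Dict Int Int × Int :=
  if p.2 ∈ pvOpsStr then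
    let symbol := if p.2 = '*' then '×' else if p.2 = '/' then ':' else p.2
    let token := [' ', symbol, ' ']
    (st.1 ++ [token], st.2.1.insert p.1 (st.2.2 + 1), st.2.2 + (token.length : Int))
  else
    (st.1 ++ [[p.2]], st.2.1, st.2.2 + 1)

def pretty_expression_with_map (source : String) : String × (List (Int × Int)) :=
  let r := (PySem.List.enumerate source.toList 0).foldl pvStepA ([], PySem.Dict.empty, 0)
  (String.mk r.1.flatten, r.2.1.items)

-- ===== PORT B =====
-- the module-level OPS dict of Source B
def pvOPS : PySem.Dict Char (List Char) :=
  PySem.Dict.ofList [('*', [' ', '×', ' ']), ('/', [' ', ':', ' ']), ('+', [' ', '+', ' ']), ('-', [' ', '-', ' '])]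

-- body of Source B's prefix-sum loop: starts.append(starts[-1] + len(t))
def pvStepB (acc : List Int) (t : List Char) : List Int :=
  acc ++ [PySem.List.pyGetD acc (-1) 0 + (t.length : Int)]

def pretty_expression_with_map_alt (source : String) : String × (List (Int × Int)) :=
  let tokens := source.toList.map (fun ch => (pvOPS.get? ch).getD [ch])
  let starts := tokens.foldl pvStepB [0]
  let op_map := ((PySem.List.enumerate source.toList 0).filter
      (fun p => (pvOPS.get? p.2).isSome)).map
      (fun p => (p.1, PySem.List.pyGetD starts p.1 0 + 1))
  (String.mk tokens.flatten, op_map)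

-- ===== PRECONDITION & SPEC =====
def Spec_pretty_expression_with_map (source : String) (out : String × (List (Int × Int))) : Prop := out = pretty_expression_with_map_alt source
instance (source : String) (out : String × (List (Int × Int))) : Decidable (Spec_pretty_expression_with_map source out) := by unfold Spec_pretty_expression_with_map; infer_instance

-- ===== CLAIM (what is proved, stated in full; the proofs are below) =====
def Claim_equal_pretty_expression_with_map : Prop := ∀ (source : String), Dom_pretty_expression_with_map source → Spec_pretty_expression_with_map source (pretty_expression_with_map source)

-- ===== LEMMAS AND PROOFS =====

def pvTok (c : Char) : List Char :=
  if c ∈ pvOpsStr then [' ', if c = '*' then '×' else if c = '/' then ':' else c, ' '] else [c]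

lemma pvOPS_items : pvOPS = PySem.Dict.mk [('*', [' ', '×', ' ']), ('/', [' ', ':', ' ']), ('+', [' ', '+', ' ']), ('-', [' ', '-', ' '])] := by decide

lemma pvOPS_get? (c : Char) : pvOPS.get? c =
    if c = '*' then some [' ', '×', ' '] else if c = '/' then some [' ', ':', ' ']
    else if c = '+' then some [' ', '+', ' '] else if c = '-' then some [' ', '-', ' '] else none := by
  by_cases h1 : c = '*'
  · subst h1; decide
  by_cases h2 : c = '/'
  · subst h2; decide
  by_cases h3 : c = '+'
  · subst h3; decide
  by_cases h4 : c = '-'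
  · subst h4; decide
  have h0 : ∀ x : Char, PySem.Dict.get? (PySem.Dict.mk ([] : List (Char × List Char))) x = none := fun _ => rfl
  rw [pvOPS_items]
  simp only [PySem.Dict.get?_mk_cons, h0]
  rw [if_neg (by simp [beq_iff_eq]; exact fun h => h1 h.symm),
      if_neg (by simp [beq_iff_eq]; exact fun h => h2 h.symm),
      if_neg (by simp [beq_iff_eq]; exact fun h => h3 h.symm),
      if_neg (by simp [beq_iff_eq]; exact fun h => h4 h.symm),
      if_neg h1, if_neg h2, if_neg h3, if_neg h4]

lemma pvTokB_eq (c : Char) : (pvOPS.get? c).getD [c] = pvTok c := by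
  rw [pvOPS_get?]
  unfold pvTok pvOpsStr
  split_ifs <;> simp_all

lemma pvIsOp_eq (c : Char) : (pvOPS.get? c).isSome = decide (c ∈ pvOpsStr) := by
  rw [pvOPS_get?]
  unfold pvOpsStr
  split_ifs <;> simp_all

def pvSumL : List (List Char) → Int
  | [] => 0
  | t :: ts => (t.length : Int) + pvSumL ts

def pvOpPairs (s b : Int) : List Char → List (Int × Int)
  | [] => []
  | c :: cs =>
    if c ∈ pvOpsStr then (s, b + 1) :: pvOpPairs (s + 1) (b + (pvTok c).length) cs
    else pvOpPairs (s + 1) (b + 1) cs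

lemma pvInsert_fresh (m : PySem.Dict Int Int) (k v : Int) (h : ∀ p ∈ m.items, p.1 ≠ k) :
    m.insert k v = PySem.Dict.mk (m.items ++ [(k, v)]) := by
  unfold PySem.Dict.insert
  rw [if_neg]
  simp only [PySem.Dict.contains, List.any_eq_true, beq_iff_eq, not_exists]
  push_neg
  exact fun p hp => h p hp

lemma pvFoldA (cs : List Char) : ∀ (s : Int) (parts : List (List Char)) (m : PySem.Dict Int Int) (b : Int),
    (∀ p ∈ m.items, p.1 < s) →
    (PySem.List.enumerate cs s).foldl pvStepA (parts, m, b)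
      = (parts ++ cs.map pvTok, PySem.Dict.mk (m.items ++ pvOpPairs s b cs), b + pvSumL (cs.map pvTok)) := by
  induction cs with
  | nil => intro s parts m b _; simp [PySem.List.enumerate, pvOpPairs, pvSumL]
  | cons c cs ih =>
    intro s parts m b hm
    rw [PySem.List.enumerate_cons, List.foldl_cons]
    by_cases hc : c ∈ pvOpsStr
    · have hstep : pvStepA (parts, m, b) (s, c)
          = (parts ++ [pvTok c], m.insert s (b + 1), b + (pvTok c).length) := by
        simp [pvStepA, pvTok, hc]
      rw [hstep, pvInsert_fresh m s (b+1) (fun p hp => ne_of_lt (hm p hp)),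
          ih (s+1) _ _ _ (by
            intro p hp
            rcases List.mem_append.mp hp with h | h
            · exact lt_trans (hm p h) (by omega)
            · rcases List.mem_singleton.mp h with rfl; simp)]
      simp [pvOpPairs, pvTok, hc, pvSumL]
      ring
    · have hstep : pvStepA (parts, m, b) (s, c) = (parts ++ [[c]], m, b + 1) := by
        simp [pvStepA, hc]
      rw [hstep, ih (s+1) _ _ _ (fun p hp => lt_trans (hm p hp) (by omega))]
      simp [pvOpPairs, pvTok, hc, pvSumL]
      omega

def pvSums (b : Int) : List (List Char) → List Int
  | [] => []
  | t :: ts => (b + (t.length : Int)) :: pvSums (b + (t.length : Int)) ts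

lemma pvFoldB (ts : List (List Char)) : ∀ (pre : List Int) (b : Int),
    ts.foldl pvStepB (pre ++ [b]) = pre ++ b :: pvSums b ts := by
  induction ts with
  | nil => intro pre b; simp [pvSums]
  | cons t ts ih =>
    intro pre b
    have hstep : pvStepB (pre ++ [b]) t = (pre ++ [b]) ++ [b + (t.length : Int)] := by
      simp [pvStepB, PySem.List.pyGetD_neg_one_append_singleton]
    rw [List.foldl_cons, hstep, ih (pre ++ [b]) (b + (t.length : Int))]
    simp [pvSums]

lemma pvGetD_sums (ts : List (List Char)) : ∀ (b : Int) (k : Nat), k ≤ ts.length →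
    (b :: pvSums b ts).getD k 0 = b + pvSumL (ts.take k) := by
  induction ts with
  | nil =>
    intro b k hk
    have hk0 : k = 0 := Nat.le_zero.mp hk
    subst hk0
    simp [pvSumL]
  | cons t ts ih =>
    intro b k hk
    cases k with
    | zero => simp [pvSumL]
    | succ k =>
      have := ih (b + (t.length : Int)) k (by simpa using hk)
      simp only [pvSums, List.getD_cons_succ, List.take_succ_cons, pvSumL] at this ⊢
      rw [this]; ring

lemma pvPairsB (cs : List Char) : ∀ (s : Int) (starts : List Int) (b : Int),
    (∀ k : Nat, k < cs.length → PySem.List.pyGetD starts (s + (k : Int)) 0 = b + pvSumL ((cs.map pvTok).take k)) →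
    ((PySem.List.enumerate cs s).filter (fun p => (pvOPS.get? p.2).isSome)).map
        (fun p => (p.1, PySem.List.pyGetD starts p.1 0 + 1))
      = pvOpPairs s b cs := by
  induction cs with
  | nil => intro s starts b _; simp [PySem.List.enumerate, pvOpPairs]
  | cons c cs ih =>
    intro s starts b H
    have h0 : PySem.List.pyGetD starts s 0 = b := by
      have := H 0 (by simp)
      simpa [pvSumL] using this
    have Htail : ∀ k : Nat, k < cs.length →
        PySem.List.pyGetD starts ((s + 1) + (k : Int)) 0
          = (b + ((pvTok c).length : Int)) + pvSumL ((cs.map pvTok).take k) := by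
      intro k hk
      have hidx : (s + 1) + (k : Int) = s + ((k + 1 : Nat) : Int) := by push_cast; ring
      have := H (k + 1) (by simpa using Nat.succ_lt_succ hk)
      rw [hidx, this]
      simp [pvSumL]
      ring
    rw [PySem.List.enumerate_cons, List.filter_cons]
    by_cases hc : c ∈ pvOpsStr
    · rw [if_pos (by simpa [pvIsOp_eq] using hc)]
      rw [List.map_cons, ih (s + 1) starts (b + ((pvTok c).length : Int)) Htail]
      simp only [pvOpPairs, if_pos hc, h0]
    · rw [if_neg (by simpa [pvIsOp_eq] using hc)]
      have hlen : ((pvTok c).length : Int) = 1 := by simp [pvTok, hc]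
      rw [ih (s + 1) starts (b + 1) (fun k hk => by have h := Htail k hk; rwa [hlen] at h)]
      simp only [pvOpPairs, if_neg hc]

theorem pretty_expression_with_map_eq (source : String) :
    pretty_expression_with_map source = pretty_expression_with_map_alt source := by
  have hA := pvFoldA source.toList 0 [] PySem.Dict.empty 0 (by intro p hp; simp [PySem.Dict.empty] at hp)
  have hB : (source.toList.map pvTok).foldl pvStepB [0]
      = 0 :: pvSums 0 (source.toList.map pvTok) := by
    simpa using pvFoldB (source.toList.map pvTok) [] 0
  have hP := pvPairsB source.toList 0 (0 :: pvSums 0 (source.toList.map pvTok)) 0 (fun k hk => by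
    have hidx : (0 : Int) + (k : Int) = (k : Int) := by ring
    rw [hidx, PySem.List.pyGetD_natCast]
    simpa using pvGetD_sums (source.toList.map pvTok) 0 k (by simpa using Nat.le_of_lt hk))
  simp only [pretty_expression_with_map, pretty_expression_with_map_alt, pvTokB_eq, hA, hB, hP]
  simp [PySem.Dict.empty]

-- ===== VERDICT (by name: the statement is the Claim_ definition above) =====
theorem pretty_expression_with_map_spec : Claim_equal_pretty_expression_with_map := by
  intro source _
  unfold Spec_pretty_expression_with_map
  exact pretty_expression_with_map_eq source
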